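-- pv_equiv track=rewrite | github.com/Verginius/CS5483_Team-Project_MTR-Stress-Flow-Simulation | src/models/od_mining.py | _estimate_transfers
-- ===== SOURCE A (Python) =====
-- def _estimate_transfers(path):
--     # Count line changes based on node suffixes (e.g. ADM_ISL -> ADM_TWL)
--     lines = [n.split('_')[1] for n in path if '_' in n]
--     if not lines:
--         return 0
--
--     transfers = 0
--     curr = lines[0]
--     for line in lines[1:]:
--         if line != curr:
--             transfers += 1
--             curr = line
--     return transfers
-- ===== SOURCE B (Python) =====
-- def _estimate_transfers(path):
--     # Count line changes based on node suffixes (e.g. ADM_ISL -> ADM_TWL)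
--     lines = [n.split('_')[1] for n in path if '_' in n]
--     if not lines:
--         return 0
--     return _transfers_in(lines, 0, len(lines))
--
--
-- def _transfers_in(lines, lo, hi):
--     # Divide and conquer: transfers in lines[lo:hi] (hi > lo) = transfers in each
--     # half plus one if a line change happens across the split point.
--     if hi - lo <= 1:
--         return 0
--     mid = (lo + hi) // 2
--     return (_transfers_in(lines, lo, mid)
--             + _transfers_in(lines, mid, hi)
--             + (1 if lines[mid - 1] != lines[mid] else 0))
-- ===== Notes on version B (the rewrite author's own statement) =====
-- stated objective: alternative
-- what changed: Replaces the linear stateful scan carrying a curr variable by a divide-and-conquer recursion: transfers in a segment = transfers in each half plus an indicator for a line change across the split point.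
import Mathlib
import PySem

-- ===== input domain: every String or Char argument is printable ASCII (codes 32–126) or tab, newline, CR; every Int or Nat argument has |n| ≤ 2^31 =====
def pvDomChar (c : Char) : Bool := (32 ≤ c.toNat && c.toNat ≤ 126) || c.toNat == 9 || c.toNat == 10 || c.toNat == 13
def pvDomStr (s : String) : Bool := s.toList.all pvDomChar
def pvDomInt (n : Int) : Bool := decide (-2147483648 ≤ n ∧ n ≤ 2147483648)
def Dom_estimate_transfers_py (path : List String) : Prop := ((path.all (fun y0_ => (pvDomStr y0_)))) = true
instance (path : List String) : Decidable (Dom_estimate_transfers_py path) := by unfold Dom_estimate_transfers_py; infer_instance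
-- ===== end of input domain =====

-- B replaces A's linear stateful scan (curr variable) by a divide-and-conquer recursion
-- over index segments; a genuinely different traversal of the same O(n) cost.

-- ===== PORT A =====
-- lines = [n.split('_')[1] for n in path if '_' in n]
-- n.split('_')[1] cannot raise when '_' in n (split then has ≥ 2 pieces), so .getD "" is never the default.
def pvLines (path : List String) : List String :=
  (path.filter (fun n => PySem.Str.isIn "_" n)).map
    (fun n => (PySem.List.pyGet? ((PySem.Str.split? n "_").getD []) 1).getD "")

def estimate_transfers_py (path : List String) : Int :=
  let lines := pvLines path
  match lines with
  | [] => 0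
  | c :: rest =>
    -- transfers = 0; curr = lines[0]; for line in lines[1:]: …
    (rest.foldl (fun (s : Int × String) line =>
        if line ≠ s.2 then (s.1 + 1, line) else s) (0, c)).1

-- ===== PORT B =====
-- _transfers_in(lines, lo, hi); lo/hi are Python ints that stay ≥ 0, ported as Nat
-- ((lo+hi)//2 on nonnegative ints agrees with Nat division).
def pvTransfersIn (lines : List String) (lo hi : Nat) : Int :=
  if hi - lo ≤ 1 then 0
  else
    let mid := (lo + hi) / 2
    pvTransfersIn lines lo mid + pvTransfersIn lines mid hi +
      (if (PySem.List.pyGet? lines ((mid : Int) - 1)).getD "" ≠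
          (PySem.List.pyGet? lines (mid : Int)).getD "" then 1 else 0)
  termination_by hi - lo
  decreasing_by all_goals omega

def estimate_transfers_py_alt (path : List String) : Int :=
  let lines := pvLines path
  match lines with
  | [] => 0
  | _ :: _ => pvTransfersIn lines 0 lines.length

-- ===== PRECONDITION & SPEC =====
def Spec_estimate_transfers_py (path : List String) (out : Int) : Prop := out = estimate_transfers_py_alt path
instance (path : List String) (out : Int) : Decidable (Spec_estimate_transfers_py path out) := by unfold Spec_estimate_transfers_py; infer_instance

-- ===== CLAIM (what is proved, stated in full; the proofs are below) =====
def Claim_equal_estimate_transfers_py : Prop := ∀ (path : List String), Dom_estimate_transfers_py path → Spec_estimate_transfers_py path (estimate_transfers_py path)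

-- ===== LEMMAS AND PROOFS =====

-- reference: number of adjacent unequal pairs
def pvAdj : List String → Int
  | [] => 0
  | [_] => 0
  | x :: y :: t => (if x ≠ y then 1 else 0) + pvAdj (y :: t)

-- A's fold computes pvAdj
lemma pv_fold_adj (rest : List String) (c : String) (t : Int) :
    (rest.foldl (fun (s : Int × String) line =>
        if line ≠ s.2 then (s.1 + 1, line) else s) (t, c)).1 = t + pvAdj (c :: rest) := by
  induction rest generalizing c t with
  | nil => simp [pvAdj]
  | cons y ys ih =>
    by_cases h : y = c
    · subst h
      simpa [pvAdj] using ih y t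
    · have hc : ¬ c = y := fun e => h e.symm
      simp only [List.foldl_cons, ne_eq, h, not_false_eq_true, if_true, pvAdj, hc]
      rw [ih y (t + 1)]
      ring

lemma pv_adj_append (u v : List String) (x : String) (hu : u ≠ []) :
    pvAdj (u ++ x :: v) =
      pvAdj u + (if u.getLast? ≠ some x then 1 else 0) + pvAdj (x :: v) := by
  induction u with
  | nil => exact absurd rfl hu
  | cons a u' ih =>
    cases u' with
    | nil =>
      simp only [List.cons_append, List.nil_append, pvAdj, List.getLast?_singleton,
        ne_eq, Option.some.injEq]
      ring
    | cons b u'' =>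
      have h := ih (by simp)
      simp only [List.cons_append, pvAdj] at h ⊢
      rw [h, List.getLast?_cons_cons]
      ring

def pvSeg (lines : List String) (lo hi : Nat) : List String :=
  (lines.drop lo).take (hi - lo)

lemma pv_seg_split (lines : List String) (lo mid hi : Nat)
    (h1 : lo ≤ mid) (h2 : mid ≤ hi) :
    pvSeg lines lo hi = pvSeg lines lo mid ++ pvSeg lines mid hi := by
  unfold pvSeg
  have : hi - lo = (mid - lo) + (hi - mid) := by omega
  have h3 : lo + (mid - lo) = mid := by omega
  rw [this, List.take_add, List.drop_drop, h3]

lemma pv_seg_len (lines : List String) (lo hi : Nat) (h : hi ≤ lines.length) :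
    (pvSeg lines lo hi).length = hi - lo := by
  simp [pvSeg]; omega

lemma pv_seg_get (lines : List String) (lo hi k : Nat) (h : hi ≤ lines.length)
    (hk : k < hi - lo) :
    (pvSeg lines lo hi)[k]'(by rw [pv_seg_len lines lo hi h]; exact hk) =
      lines[lo + k]'(by omega) := by
  simp [pvSeg]

lemma pv_seg_singleton (lines : List String) (lo : Nat) (h : lo < lines.length) :
    pvSeg lines lo (lo + 1) = [lines[lo]] := by
  apply List.ext_getElem
  · rw [pv_seg_len lines lo (lo+1) (by omega)]
    simp only [List.length_cons, List.length_nil]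
    omega
  · intro i h1 h2
    have hi : i = 0 := by
      rw [pv_seg_len lines lo (lo+1) (by omega)] at h1; omega
    subst hi
    rw [pv_seg_get lines lo (lo+1) 0 (by omega) (by omega)]
    simp

lemma pv_transfers_adj (lines : List String) :
    ∀ (n lo hi : Nat), hi - lo ≤ n → lo < hi → hi ≤ lines.length →
      pvTransfersIn lines lo hi = pvAdj (pvSeg lines lo hi) := by
  intro n
  induction n with
  | zero => intro lo hi h hlt _; omega
  | succ n ih =>
    intro lo hi hle hlt hlen
    rw [pvTransfersIn]
    by_cases hsmall : hi - lo ≤ 1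
    · have : hi = lo + 1 := by omega
      subst this
      rw [pv_seg_singleton lines lo (by omega)]
      simp [pvAdj]
    · simp only [hsmall, if_false]
      set mid := (lo + hi) / 2 with hmid
      have hm1 : lo < mid := by omega
      have hm2 : mid < hi := by omega
      rw [pv_seg_split lines lo mid hi (by omega) (by omega)]
      have hmidlen : mid < lines.length := by omega
      have hseg2 : pvSeg lines mid hi = lines[mid] :: pvSeg lines (mid + 1) hi := by
        rw [pv_seg_split lines mid (mid+1) hi (by omega) (by omega),
            pv_seg_singleton lines mid hmidlen]
        simp
      have hu : pvSeg lines lo mid ≠ [] := by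
        intro h
        have := pv_seg_len lines lo mid (by omega)
        rw [h] at this; simp at this; omega
      rw [hseg2, pv_adj_append _ _ _ hu]
      have hlast : (pvSeg lines lo mid).getLast? = some (lines[mid - 1]'(by omega)) := by
        have hg := pv_seg_get lines lo mid ((mid - lo) - 1) (by omega) (by omega)
        have hlen : (pvSeg lines lo mid).length = mid - lo := pv_seg_len lines lo mid (by omega)
        rw [List.getLast?_eq_getElem?, hlen, List.getElem?_eq_getElem (by omega)]
        rw [Option.some_inj, hg]
        congr 1
        omega
      have hg1 : (PySem.List.pyGet? lines ((mid : Int) - 1)).getD "" = lines[mid - 1]'(by omega) := by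
        have : ((mid : Int) - 1) = ((mid - 1 : Nat) : Int) := by omega
        rw [this, PySem.List.pyGet?_natCast]
        simp [List.getElem?_eq_getElem (by omega : mid - 1 < lines.length)]
      have hg2 : (PySem.List.pyGet? lines (mid : Int)).getD "" = lines[mid] := by
        rw [PySem.List.pyGet?_natCast]
        simp [List.getElem?_eq_getElem hmidlen]
      rw [ih lo mid (by omega) hm1 (by omega), ih mid hi (by omega) hm2 hlen,
          hseg2, hg1, hg2, hlast]
      simp only [ne_eq, Option.some.injEq]
      ring

-- ===== VERDICT (by name: the statement is the Claim_ definition above) =====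
theorem estimate_transfers_py_spec : Claim_equal_estimate_transfers_py := by
  intro path _
  show estimate_transfers_py path = estimate_transfers_py_alt path
  simp only [estimate_transfers_py, estimate_transfers_py_alt]
  cases hl : pvLines path with
  | nil => rfl
  | cons c rest =>
    show (rest.foldl (fun (s : Int × String) line =>
        if line ≠ s.2 then (s.1 + 1, line) else s) (0, c)).1 =
      pvTransfersIn (c :: rest) 0 (c :: rest).length
    rw [pv_fold_adj rest c 0,
        pv_transfers_adj (c :: rest) (c :: rest).length 0 (c :: rest).length
          (by omega) (by simp) (by omega)]
    simp [pvSeg]
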